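-- pv_equiv track=rewrite | github.com/posl/comment_recommendation | script/split_gen/4_time/zh/248_C/2.py | solve
-- ===== SOURCE A (Python) =====
-- def solve(n, m, k):
--     dp = [[[0 for _ in range(k + 1)] for _ in range(m + 1)] for _ in range(n + 1)]
--     dp[0][0][0] = 1
--     for i in range(1, n + 1):
--         for j in range(m + 1):
--             for s in range(k + 1):
--                 dp[i][j][s] += dp[i - 1][j][s]
--                 if j > 0 and s >= i:
--                     dp[i][j][s] += dp[i - 1][j - 1][s - i]
--                 dp[i][j][s] %= 998244353
--     return dp[n][m][k]
-- ===== SOURCE B (Python) =====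
-- def solve(n, m, k):
--     # Staircase bijection: subtract (1,2,...,m) from a sorted size-m subset of 1..n;
--     # this bijects size-m subsets of 1..n with sum k onto partitions of
--     # r = k - m*(m+1)//2 into at most m parts, each part at most c = n - m.
--     # Count those partitions by the Gaussian-binomial recurrence
--     # P(cap, j, s) = P(cap-1, j, s) + P(cap, j-1, s-cap)  (no part equals cap / remove one part = cap).
--     MOD = 998244353
--     c = n - m
--     r = k - m * (m + 1) // 2
--     if c < 0 or r < 0:
--         return 0
--     dp = [[1 if s == 0 else 0 for s in range(r + 1)] for _ in range(m + 1)]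
--     for cap in range(1, c + 1):
--         for j in range(1, m + 1):
--             for s in range(cap, r + 1):
--                 dp[j][s] = (dp[j][s] + dp[j - 1][s - cap]) % MOD
--     return dp[m][r]
-- ===== Notes on version B (the rewrite author's own statement) =====
-- stated objective: faster
-- what changed: B counts via the staircase bijection: size-m subsets of 1..n summing to k correspond to partitions of k-m(m+1)/2 into at most m parts each at most n-m, counted by the Gaussian-binomial partition recurrence dp[j][s] = dp[j][s] + dp[j-1][s-cap] over part caps 1..n-m, instead of A's item-by-item 3D subset DP.
import Mathlib
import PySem

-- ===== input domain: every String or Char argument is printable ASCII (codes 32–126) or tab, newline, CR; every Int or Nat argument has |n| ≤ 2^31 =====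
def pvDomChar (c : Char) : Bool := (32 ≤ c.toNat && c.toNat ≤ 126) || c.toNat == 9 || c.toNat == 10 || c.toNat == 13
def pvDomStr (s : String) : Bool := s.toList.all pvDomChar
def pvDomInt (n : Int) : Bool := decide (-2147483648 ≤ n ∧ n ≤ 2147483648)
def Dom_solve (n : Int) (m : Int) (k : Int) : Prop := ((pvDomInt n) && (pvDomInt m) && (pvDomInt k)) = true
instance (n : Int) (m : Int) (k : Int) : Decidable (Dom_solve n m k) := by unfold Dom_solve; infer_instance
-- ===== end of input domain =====

-- B replaces A's item-by-item 3D subset DP by a different algorithm: the staircase bijection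
-- maps size-m subsets of 1..n with sum k onto partitions of k - m(m+1)/2 into at most m parts
-- each at most n - m, counted by the Gaussian-binomial partition recurrence.

-- ===== PORT A =====
-- A's dp is a 3D array of ints; we model it as a map on Int triples
-- (cells never touched stay 0, as in the Python list initialisation).
def innerA (i j : Int) (dp : Std.HashMap (Int × Int × Int) Int) (s : Int) : Std.HashMap (Int × Int × Int) Int :=
  let v := dp.getD (i, j, s) 0 + dp.getD (i - 1, j, s) 0
  let v := if 0 < j ∧ i ≤ s then v + dp.getD (i - 1, j - 1, s - i) 0 else v
  dp.insert (i, j, s) (PySem.Int.mod v 998244353)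

def rowA (k i : Int) (dp : Std.HashMap (Int × Int × Int) Int) (j : Int) : Std.HashMap (Int × Int × Int) Int :=
  (PySem.List.pyRange 0 (k + 1) 1).foldl (innerA i j) dp

def stepA (m k : Int) (dp : Std.HashMap (Int × Int × Int) Int) (i : Int) : Std.HashMap (Int × Int × Int) Int :=
  (PySem.List.pyRange 0 (m + 1) 1).foldl (rowA k i) dp

def solve (n : Int) (m : Int) (k : Int) : Int :=
  ((PySem.List.pyRange 1 (n + 1) 1).foldl (stepA m k)
    ((∅ : Std.HashMap (Int × Int × Int) Int).insert ((0:Int), (0:Int), (0:Int)) 1)).getD (n, m, k) 0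

-- ===== PORT B =====
-- dp[j][s] = partitions of s into at most j parts each ≤ current cap; the table is
-- the map (j,s) ↦ value with default 0 for never-written zero cells.
def cellB (cap j : Int) (dp : Std.HashMap (Int × Int) Int) (s : Int) : Std.HashMap (Int × Int) Int :=
  dp.insert (j, s) (PySem.Int.mod (dp.getD (j, s) 0 + dp.getD (j - 1, s - cap) 0) 998244353)

def rowB (r cap : Int) (dp : Std.HashMap (Int × Int) Int) (j : Int) : Std.HashMap (Int × Int) Int :=
  (PySem.List.pyRange cap (r + 1) 1).foldl (cellB cap j) dp

def stepB (m r : Int) (dp : Std.HashMap (Int × Int) Int) (cap : Int) : Std.HashMap (Int × Int) Int :=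
  (PySem.List.pyRange 1 (m + 1) 1).foldl (rowB r cap) dp

def initB (m : Int) : Std.HashMap (Int × Int) Int :=
  (PySem.List.pyRange 0 (m + 1) 1).foldl (fun d j => d.insert (j, (0:Int)) 1) ∅

def solve_alt (n : Int) (m : Int) (k : Int) : Int :=
  let c := n - m
  let r := k - PySem.Int.floordiv (m * (m + 1)) 2
  if c < 0 ∨ r < 0 then 0
  else ((PySem.List.pyRange 1 (c + 1) 1).foldl (stepB m r) (initB m)).getD (m, r) 0

-- ===== PRECONDITION & SPEC =====
-- Pre excludes negative n, m or k, on which the Python A raises IndexError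
-- (its freshly built nested list is too short for the assignment dp[0][0][0] = 1
-- or for the final read dp[n][m][k]).
def Pre_solve (n : Int) (m : Int) (k : Int) : Prop := 0 ≤ n ∧ 0 ≤ m ∧ 0 ≤ k
instance (n : Int) (m : Int) (k : Int) : Decidable (Pre_solve n m k) := by unfold Pre_solve; infer_instance
def pvWitness_solve : Int × Int × Int := (4, 2, 5)

def Spec_solve (n : Int) (m : Int) (k : Int) (out : Int) : Prop := out = solve_alt n m k
instance (n : Int) (m : Int) (k : Int) (out : Int) : Decidable (Spec_solve n m k out) := by unfold Spec_solve; infer_instance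

-- ===== CLAIM (what is proved, stated in full; the proofs are below) =====
def Claim_equal_solve : Prop := ∀ (n : Int) (m : Int) (k : Int), Dom_solve n m k → Pre_solve n m k → Spec_solve n m k (solve n m k)

-- ===== LEMMAS AND PROOFS =====

-- HashMap bridge: getD after insert/empty
lemma getD_insert_eq {κ : Type} [BEq κ] [LawfulBEq κ] [Hashable κ] [DecidableEq κ]
    (d : Std.HashMap κ Int) (p q : κ) (v : Int) :
    (d.insert p v).getD q 0 = if q = p then v else d.getD q 0 := by
  rw [Std.HashMap.getD_insert]
  by_cases h : q = p
  · subst h; simp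
  · rw [if_neg (by simpa [beq_iff_eq] using fun e => h e.symm), if_neg h]

lemma getD_empty_zero {κ : Type} [BEq κ] [LawfulBEq κ] [Hashable κ] (q : κ) :
    (∅ : Std.HashMap κ Int).getD q 0 = 0 := by simp

-- A's mathematical recurrence: FN i j s = number of size-j subsets of {1..i} summing
-- to s, reduced mod 998244353 exactly as A reduces it.
def FN : Nat → Int → Int → Int
  | 0, j, s => if j = 0 ∧ s = 0 then 1 else 0
  | (i+1), j, s =>
      PySem.Int.mod (FN i j s + (if 0 < j ∧ (i : Int) + 1 ≤ s then FN i (j - 1) (s - ((i : Int) + 1)) else 0)) 998244353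

lemma FN_bounds (i : Nat) (j s : Int) : 0 ≤ FN i j s ∧ FN i j s < 998244353 := by
  cases i with
  | zero => simp only [FN]; split <;> norm_num
  | succ t =>
      rw [FN, PySem.Int.mod_eq_emod_of_pos (by norm_num)]
      exact ⟨Int.emod_nonneg _ (by norm_num), Int.emod_lt_of_pos _ (by norm_num)⟩

lemma FN_mod (i : Nat) (j s : Int) : PySem.Int.mod (FN i j s) 998244353 = FN i j s := by
  rw [PySem.Int.mod_eq_emod_of_pos (by norm_num)]
  exact Int.emod_eq_of_lt (FN_bounds i j s).1 (FN_bounds i j s).2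

-- B's mathematical recurrence: GB cap j s = number of partitions of s into at most j
-- parts each ≤ cap, reduced mod 998244353 exactly as B reduces it.
def GB : Nat → Nat → Int → Int
  | 0, _, s => if s = 0 then 1 else 0
  | cap+1, 0, s => GB cap 0 s
  | cap+1, j+1, s =>
      if ((cap : Int) + 1) ≤ s then
        PySem.Int.mod (GB cap (j+1) s + GB (cap+1) j (s - ((cap : Int) + 1))) 998244353
      else GB cap (j+1) s

lemma GB_bounds (cap j : Nat) (s : Int) : 0 ≤ GB cap j s ∧ GB cap j s < 998244353 := by
  induction cap generalizing j s with
  | zero => simp only [GB]; split <;> norm_num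
  | succ c ih =>
      cases j with
      | zero => rw [GB]; exact ih 0 s
      | succ t =>
          rw [GB]
          split
          · rw [PySem.Int.mod_eq_emod_of_pos (by norm_num)]
            exact ⟨Int.emod_nonneg _ (by norm_num), Int.emod_lt_of_pos _ (by norm_num)⟩
          · exact ih (t+1) s

lemma GB_mod (cap j : Nat) (s : Int) : PySem.Int.mod (GB cap j s) 998244353 = GB cap j s := by
  rw [PySem.Int.mod_eq_emod_of_pos (by norm_num)]
  exact Int.emod_eq_of_lt (GB_bounds cap j s).1 (GB_bounds cap j s).2

-- the triangular number T j = j (j+1) / 2, as Python computes it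
def TRI (j : Int) : Int := PySem.Int.floordiv (j * (j + 1)) 2

lemma TRI_two_mul (j : Int) : 2 * TRI j = j * (j + 1) := by
  have h2 : (2:Int) ∣ j * (j + 1) := Int.even_mul_succ_self j |>.two_dvd
  rw [TRI, PySem.Int.floordiv_eq_ediv_of_pos (by norm_num)]
  exact Int.mul_ediv_cancel' h2

lemma TRI_succ (j : Int) : TRI j = TRI (j - 1) + j := by
  have h1 := TRI_two_mul j
  have h2 := TRI_two_mul (j - 1)
  have : (j - 1) * (j - 1 + 1) = j * (j + 1) - 2 * j := by ring
  omega

lemma TRI_nonneg (j : Int) (hj : 0 ≤ j) : 0 ≤ TRI j := by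
  have h := TRI_two_mul j
  nlinarith [mul_nonneg hj (show (0:Int) ≤ j + 1 by omega)]

lemma TRI_ge (j : Int) (hj : 0 ≤ j) : j ≤ TRI j := by
  have h := TRI_two_mul j
  rcases eq_or_lt_of_le hj with h0 | h1
  · subst h0; norm_num at h; omega
  · nlinarith [mul_le_mul_of_nonneg_left (show (1:Int) ≤ j by omega) (le_of_lt h1)]

-- ===== the bridge identity: A's counts are B's shifted partition counts =====
lemma mod_zero_p : PySem.Int.mod 0 998244353 = 0 := by
  rw [PySem.Int.mod_eq_emod_of_pos (by norm_num)]
  norm_num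

lemma mod_one_p : PySem.Int.mod 1 998244353 = 1 := by
  rw [PySem.Int.mod_eq_emod_of_pos (by norm_num)]
  norm_num

lemma TRI_zero : TRI 0 = 0 := by
  have h := TRI_two_mul 0
  norm_num at h
  omega

lemma GB_zero (c : Nat) (s : Int) : GB c 0 s = if s = 0 then 1 else 0 := by
  induction c with
  | zero => simp only [GB]
  | succ c ih => rw [GB, ih]

lemma GB_zero_cap (jn : Nat) (x : Int) : GB 0 jn x = if x = 0 then 1 else 0 := by
  simp only [GB]

lemma FN_eq_GB (i : Nat) (j s : Int) :
    FN i j s = if 0 ≤ j ∧ j ≤ (i : Int) ∧ TRI j ≤ s then GB (i - j.toNat) j.toNat (s - TRI j) else 0 := by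
  induction i generalizing j s with
  | zero =>
      simp only [FN, Nat.cast_zero]
      by_cases hc : 0 ≤ j ∧ j ≤ (0 : Int) ∧ TRI j ≤ s
      · have hj : j = 0 := by omega
        subst hj
        rw [if_pos hc]
        simp only [Int.toNat_zero, Nat.sub_zero, GB_zero_cap, TRI_zero, sub_zero]
        by_cases hs : s = 0 <;> simp [hs]
      · rw [if_neg hc, if_neg (by
          rintro ⟨hj, hs⟩
          subst hj; subst hs
          exact hc ⟨le_refl 0, le_refl 0, by rw [TRI_zero]⟩)]
  | succ i ih =>
      have hcast : ((i + 1 : Nat) : Int) = (i : Int) + 1 := by push_cast; ring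
      simp only [FN, hcast]
      by_cases hc : 0 ≤ j ∧ j ≤ (i : Int) + 1 ∧ TRI j ≤ s
      · obtain ⟨hj0, hji1, hTs⟩ := hc
        conv_rhs => rw [if_pos (show 0 ≤ j ∧ j ≤ (i : Int) + 1 ∧ TRI j ≤ s from ⟨hj0, hji1, hTs⟩)]
        by_cases hj00 : j = 0
        · subst hj00
          rw [if_neg (fun h => absurd h.1 (lt_irrefl 0)), add_zero, FN_mod, ih 0 s,
            if_pos ⟨le_refl 0, Int.natCast_nonneg i, hTs⟩]
          simp only [Int.toNat_zero, Nat.sub_zero, GB_zero]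
        · have hj1 : 1 ≤ j := by omega
          have hT := TRI_succ j
          have hT0 : 0 ≤ TRI (j - 1) := TRI_nonneg _ (by omega)
          by_cases hji : j ≤ (i : Int)
          · -- main case: both sides follow the same recurrence
            obtain ⟨u, hu⟩ : ∃ u : Nat, j.toNat = u + 1 := ⟨(j - 1).toNat, by omega⟩
            have hu' : (j - 1).toNat = u := by omega
            have hcap : ((i - (u + 1) : Nat) : Int) = (i : Int) - j := by omega
            rw [show (i + 1) - j.toNat = (i - (u + 1)) + 1 from by omega, hu]
            simp only [GB]
            rw [ih j s, if_pos ⟨hj0, hji, hTs⟩, hu]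
            by_cases hCG : ((i - (u + 1) : Nat) : Int) + 1 ≤ s - TRI j
            · have his : (i : Int) + 1 ≤ s := by omega
              rw [if_pos hCG, if_pos (show 0 < j ∧ (i : Int) + 1 ≤ s from ⟨by omega, his⟩),
                ih (j - 1) (s - ((i : Int) + 1)),
                if_pos (show 0 ≤ j - 1 ∧ j - 1 ≤ (i : Int) ∧ TRI (j - 1) ≤ s - ((i : Int) + 1) from
                  ⟨by omega, by omega, by omega⟩), hu',
                show i - u = (i - (u + 1)) + 1 from by omega,
                show s - ((i : Int) + 1) - TRI (j - 1)
                    = s - TRI j - (((i - (u + 1) : Nat) : Int) + 1) from by omega]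
            · rw [if_neg hCG]
              have hzero : (if 0 < j ∧ (i : Int) + 1 ≤ s
                  then FN i (j - 1) (s - ((i : Int) + 1)) else 0) = 0 := by
                by_cases hg : 0 < j ∧ (i : Int) + 1 ≤ s
                · rw [if_pos hg, ih (j - 1) (s - ((i : Int) + 1)),
                    if_neg (by rintro ⟨-, -, h3⟩; omega)]
                · rw [if_neg hg]
              rw [hzero, add_zero]
              exact GB_mod (i - (u + 1)) (u + 1) (s - TRI j)
          · -- j = i + 1: the new item is the whole remaining staircase
            have hji' : j = (i : Int) + 1 := by omega
            rw [show (i + 1) - j.toNat = 0 from by omega, ih j s,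
              if_neg (show ¬(0 ≤ j ∧ j ≤ (i : Int) ∧ TRI j ≤ s) from
                fun h => absurd h.2.1 (by omega)), zero_add, GB_zero_cap]
            by_cases hs0 : s - TRI j = 0
            · have his : (i : Int) + 1 ≤ s := by have := TRI_ge j (by omega); omega
              rw [if_pos (show 0 < j ∧ (i : Int) + 1 ≤ s from ⟨by omega, his⟩),
                ih (j - 1) (s - ((i : Int) + 1)),
                if_pos (show 0 ≤ j - 1 ∧ j - 1 ≤ (i : Int) ∧ TRI (j - 1) ≤ s - ((i : Int) + 1) from
                  ⟨by omega, by omega, by omega⟩),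
                show i - (j - 1).toNat = 0 from by omega, GB_zero_cap,
                if_pos (by omega), if_pos hs0, mod_one_p]
            · rw [if_neg hs0]
              have hzero : (if 0 < j ∧ (i : Int) + 1 ≤ s
                  then FN i (j - 1) (s - ((i : Int) + 1)) else 0) = 0 := by
                by_cases hg : 0 < j ∧ (i : Int) + 1 ≤ s
                · rw [if_pos hg, ih (j - 1) (s - ((i : Int) + 1))]
                  by_cases hC2 : 0 ≤ j - 1 ∧ j - 1 ≤ (i : Int) ∧ TRI (j - 1) ≤ s - ((i : Int) + 1)
                  · rw [if_pos hC2, show i - (j - 1).toNat = 0 from by omega, GB_zero_cap,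
                      if_neg (by omega)]
                  · rw [if_neg hC2]
                · rw [if_neg hg]
              rw [hzero, mod_zero_p]
      · rw [if_neg hc]
        have hT := TRI_succ j
        have h1 : FN i j s = 0 := by
          rw [ih j s, if_neg (by rintro ⟨a1, a2, a3⟩; exact hc ⟨a1, by omega, a3⟩)]
        have h2 : (if 0 < j ∧ (i : Int) + 1 ≤ s
            then FN i (j - 1) (s - ((i : Int) + 1)) else 0) = 0 := by
          by_cases hg : 0 < j ∧ (i : Int) + 1 ≤ s
          · rw [if_pos hg, ih (j - 1) (s - ((i : Int) + 1)),
              if_neg (by rintro ⟨b1, b2, b3⟩; exact hc ⟨by omega, by omega, by omega⟩)]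
          · rw [if_neg hg]
        rw [h1, h2, add_zero, mod_zero_p]

-- ===== A's table invariant =====
def AvalF (i : Int) (dp : Std.HashMap (Int × Int × Int) Int) (j s : Int) : Int :=
  PySem.Int.mod (dp.getD (i, j, s) 0 + dp.getD (i - 1, j, s) 0 + (if 0 < j ∧ i ≤ s then dp.getD (i - 1, j - 1, s - i) 0 else 0)) 998244353

lemma innerA_apply (i j : Int) (dp : Std.HashMap (Int × Int × Int) Int) (s a b c : Int) :
    (innerA i j dp s).getD (a, b, c) 0 = if a = i ∧ b = j ∧ c = s then AvalF i dp j s else dp.getD (a, b, c) 0 := by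
  by_cases hg : 0 < j ∧ i ≤ s <;>
    simp [innerA, AvalF, getD_insert_eq, hg, Prod.ext_iff]

lemma foldl_innerA (i j : Int) (L : List Int) (hL : L.Nodup) (dp : Std.HashMap (Int × Int × Int) Int)
    (a b c : Int) :
    (L.foldl (innerA i j) dp).getD (a, b, c) 0
      = if a = i ∧ b = j ∧ c ∈ L then AvalF i dp j c else dp.getD (a, b, c) 0 := by
  induction L generalizing dp with
  | nil => simp
  | cons s0 t ih =>
      obtain ⟨hs0, ht⟩ := List.nodup_cons.mp hL
      rw [List.foldl_cons, ih ht]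
      by_cases hct : a = i ∧ b = j ∧ c ∈ t
      · rw [if_pos hct, if_pos ⟨hct.1, hct.2.1, List.mem_cons_of_mem _ hct.2.2⟩]
        have hcne : c ≠ s0 := fun h => hs0 (h ▸ hct.2.2)
        unfold AvalF
        simp only [innerA_apply]
        rw [if_neg (fun h => hcne h.2.2),
            if_neg (fun (h : i - 1 = i ∧ _) => absurd h.1 (by omega)),
            if_neg (fun (h : i - 1 = i ∧ _) => absurd h.1 (by omega))]
      · rw [if_neg hct, innerA_apply]
        by_cases h0 : a = i ∧ b = j ∧ c = s0
        · rw [if_pos h0, if_pos ⟨h0.1, h0.2.1, by simp [h0.2.2]⟩, h0.2.2]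
        · rw [if_neg h0, if_neg (by simp only [List.mem_cons]; tauto)]

lemma foldl_rowA (i k : Int) (Lj : List Int) (hLj : Lj.Nodup) (dp : Std.HashMap (Int × Int × Int) Int)
    (a b c : Int) :
    (Lj.foldl (rowA k i) dp).getD (a, b, c) 0
      = if a = i ∧ b ∈ Lj ∧ 0 ≤ c ∧ c ≤ k then AvalF i dp b c else dp.getD (a, b, c) 0 := by
  induction Lj generalizing dp with
  | nil => simp
  | cons j0 t ih =>
      obtain ⟨hj0, ht⟩ := List.nodup_cons.mp hLj
      rw [List.foldl_cons, ih ht]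
      have hrow : ∀ (dp : Std.HashMap (Int × Int × Int) Int) a b c, (rowA k i dp j0).getD (a, b, c) 0
          = if a = i ∧ b = j0 ∧ 0 ≤ c ∧ c ≤ k then AvalF i dp j0 c else dp.getD (a, b, c) 0 := by
        intro dp a b c
        rw [rowA, foldl_innerA i j0 _ (PySem.List.nodup_pyRange_one _ _) dp]
        congr 1
        simp only [eq_iff_iff, PySem.List.mem_pyRange_one]
        constructor <;> (rintro ⟨h1, h2, h3⟩; exact ⟨h1, h2, by omega⟩)
      by_cases hbt : a = i ∧ b ∈ t ∧ 0 ≤ c ∧ c ≤ k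
      · rw [if_pos hbt, if_pos ⟨hbt.1, List.mem_cons_of_mem _ hbt.2.1, hbt.2.2⟩]
        have hbne : b ≠ j0 := fun h => hj0 (h ▸ hbt.2.1)
        unfold AvalF
        simp only [hrow]
        rw [if_neg (fun h => hbne h.2.1),
            if_neg (fun (h : i - 1 = i ∧ _) => absurd h.1 (by omega)),
            if_neg (fun (h : i - 1 = i ∧ _) => absurd h.1 (by omega))]
      · rw [if_neg hbt, hrow]
        by_cases h0 : a = i ∧ b = j0 ∧ 0 ≤ c ∧ c ≤ k
        · rw [if_pos h0, if_pos ⟨h0.1, by simp [h0.2.1], h0.2.2⟩, h0.2.1]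
        · rw [if_neg h0, if_neg (by simp only [List.mem_cons]; tauto)]

lemma stepA_apply (m k i : Int) (dp : Std.HashMap (Int × Int × Int) Int) (a b c : Int) :
    (stepA m k dp i).getD (a, b, c) 0
      = if a = i ∧ 0 ≤ b ∧ b ≤ m ∧ 0 ≤ c ∧ c ≤ k then AvalF i dp b c else dp.getD (a, b, c) 0 := by
  rw [stepA, foldl_rowA i k _ (PySem.List.nodup_pyRange_one _ _) dp]
  congr 1
  simp only [eq_iff_iff, PySem.List.mem_pyRange_one]
  constructor <;> (rintro ⟨h1, h2, h3⟩; exact ⟨h1, by omega, by omega⟩)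

lemma A_inv (m k : Int) (hm : 0 ≤ m) (hk : 0 ≤ k) (t : Nat) (a b c : Int) :
    ((PySem.List.pyRange 1 ((t : Int) + 1) 1).foldl (stepA m k)
        ((∅ : Std.HashMap (Int × Int × Int) Int).insert ((0:Int), (0:Int), (0:Int)) 1)).getD (a, b, c) 0
      = if 0 ≤ a ∧ a ≤ (t : Int) ∧ 0 ≤ b ∧ b ≤ m ∧ 0 ≤ c ∧ c ≤ k then FN a.toNat b c else 0 := by
  induction t generalizing a b c with
  | zero =>
      rw [PySem.List.pyRange_one_eq_nil (by omega)]
      simp only [List.foldl_nil, getD_insert_eq, getD_empty_zero, Prod.ext_iff]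
      by_cases h000 : a = 0 ∧ b = 0 ∧ c = 0
      · obtain ⟨ha, hb, hc⟩ := h000; subst ha; subst hb; subst hc
        simp [FN, hm, hk]
      · rw [if_neg (by tauto)]
        by_cases hP : 0 ≤ a ∧ a ≤ ((0:Nat) : Int) ∧ 0 ≤ b ∧ b ≤ m ∧ 0 ≤ c ∧ c ≤ k
        · rw [if_pos hP]
          have ha0 : a.toNat = 0 := by omega
          rw [ha0]
          simp only [FN]
          rw [if_neg (by omega)]
        · rw [if_neg hP]
  | succ t ih =>
      have hc1 : ((t + 1 : Nat) : Int) + 1 = ((t : Int) + 1) + 1 := by push_cast; ring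
      rw [hc1, PySem.List.pyRange_one_succ_right (by omega), List.foldl_append,
        List.foldl_cons, List.foldl_nil, stepA_apply]
      by_cases hw : a = (t : Int) + 1 ∧ 0 ≤ b ∧ b ≤ m ∧ 0 ≤ c ∧ c ≤ k
      · obtain ⟨ha, hb0, hbm, hc0, hck⟩ := hw
        rw [if_pos ⟨ha, hb0, hbm, hc0, hck⟩, if_pos (by omega)]
        unfold AvalF
        simp only [ih]
        rw [if_neg (by omega), if_pos (by omega)]
        have hat : a.toNat = t + 1 := by omega
        rw [hat]
        by_cases hg : 0 < b ∧ (t : Int) + 1 ≤ c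
        · rw [if_pos (by exact ⟨hg.1, by omega⟩), if_pos (by omega)]
          simp only [FN]
          rw [if_pos (by exact ⟨hg.1, by omega⟩), zero_add]
          simp only [show ((t : Int) + 1 - 1).toNat = t from by omega]
        · rw [if_neg (by omega)]
          simp only [FN]
          rw [if_neg (by omega), zero_add]
          simp only [show ((t : Int) + 1 - 1).toNat = t from by omega]
      · rw [if_neg hw, ih]
        by_cases hPt : 0 ≤ a ∧ a ≤ (t : Int) ∧ 0 ≤ b ∧ b ≤ m ∧ 0 ≤ c ∧ c ≤ k
        · rw [if_pos hPt, if_pos (by omega)]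
        · rw [if_neg hPt, if_neg (by omega)]

-- ===== B's table invariant =====
lemma foldl_initB (L : List Int) (d : Std.HashMap (Int × Int) Int) (a b : Int) :
    (L.foldl (fun d j => d.insert (j, (0:Int)) 1) d).getD (a, b) 0
      = if a ∈ L ∧ b = 0 then 1 else d.getD (a, b) 0 := by
  induction L generalizing d with
  | nil => simp
  | cons j0 t ih =>
      rw [List.foldl_cons, ih]
      by_cases hat : a ∈ t ∧ b = 0
      · rw [if_pos hat, if_pos ⟨List.mem_cons_of_mem _ hat.1, hat.2⟩]
      · rw [if_neg hat, getD_insert_eq]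
        by_cases h0 : a = j0 ∧ b = 0
        · rw [if_pos (by simp [Prod.ext_iff, h0.1, h0.2]), if_pos ⟨by simp [h0.1], h0.2⟩]
        · rw [if_neg (by simp [Prod.ext_iff]; tauto), if_neg (by simp only [List.mem_cons]; tauto)]

def BvalF (cap : Int) (dp : Std.HashMap (Int × Int) Int) (j s : Int) : Int :=
  PySem.Int.mod (dp.getD (j, s) 0 + dp.getD (j - 1, s - cap) 0) 998244353

lemma cellB_apply (cap j : Int) (dp : Std.HashMap (Int × Int) Int) (s a b : Int) :
    (cellB cap j dp s).getD (a, b) 0 = if a = j ∧ b = s then BvalF cap dp j s else dp.getD (a, b) 0 := by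
  simp [cellB, BvalF, getD_insert_eq, Prod.ext_iff]

lemma foldl_cellB (cap j : Int) (L : List Int) (hL : L.Nodup) (dp : Std.HashMap (Int × Int) Int) (a b : Int) :
    (L.foldl (cellB cap j) dp).getD (a, b) 0
      = if a = j ∧ b ∈ L then BvalF cap dp j b else dp.getD (a, b) 0 := by
  induction L generalizing dp with
  | nil => simp
  | cons s0 t ih =>
      obtain ⟨hs0, ht⟩ := List.nodup_cons.mp hL
      rw [List.foldl_cons, ih ht]
      by_cases hct : a = j ∧ b ∈ t
      · rw [if_pos hct, if_pos ⟨hct.1, List.mem_cons_of_mem _ hct.2⟩]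
        have hbne : b ≠ s0 := fun h => hs0 (h ▸ hct.2)
        unfold BvalF
        simp only [cellB_apply]
        rw [if_neg (fun h => hbne h.2),
            if_neg (fun (h : j - 1 = j ∧ _) => absurd h.1 (by omega))]
      · rw [if_neg hct, cellB_apply]
        by_cases h0 : a = j ∧ b = s0
        · rw [if_pos h0, if_pos ⟨h0.1, by simp [h0.2]⟩, h0.2]
        · rw [if_neg h0, if_neg (by simp only [List.mem_cons]; tauto)]

-- table contents after t full caps and the first J rows of cap t+1
def Gmid (m r : Int) (t : Nat) (J a b : Int) : Int :=
  if 0 ≤ a ∧ a ≤ m ∧ 0 ≤ b ∧ b ≤ r then GB (if a ≤ J then t + 1 else t) a.toNat b else 0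

lemma rowB_run (m r : Int) (t : Nat) (J : Int) (hJ : 0 ≤ J) (hJm : J < m)
    (dp : Std.HashMap (Int × Int) Int)
    (hdp : ∀ a b, dp.getD (a, b) 0 = Gmid m r t J a b) (a b : Int) :
    (rowB r ((t : Int) + 1) dp (J + 1)).getD (a, b) 0 = Gmid m r t (J + 1) a b := by
  have hx : (J + 1).toNat = J.toNat + 1 := by omega
  rw [rowB, foldl_cellB _ _ _ (PySem.List.nodup_pyRange_one _ _) dp]
  by_cases ha : a = J + 1
  · subst ha
    by_cases hbr : (t : Int) + 1 ≤ b ∧ b < r + 1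
    · rw [if_pos ⟨rfl, PySem.List.mem_pyRange_one.mpr hbr⟩]
      unfold BvalF
      rw [hdp, hdp]
      have e1 : Gmid m r t J (J + 1) b = GB t (J.toNat + 1) b := by
        unfold Gmid
        rw [if_pos (by omega), if_neg (show ¬(J + 1 ≤ J) by omega), hx]
      have e2 : Gmid m r t J (J + 1 - 1) (b - ((t : Int) + 1)) = GB (t + 1) J.toNat (b - ((t : Int) + 1)) := by
        unfold Gmid
        rw [show J + 1 - 1 = J by ring, if_pos (by omega), if_pos (le_refl J)]
      have e3 : Gmid m r t (J + 1) (J + 1) b = GB (t + 1) (J.toNat + 1) b := by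
        unfold Gmid
        rw [if_pos (by omega), if_pos (le_refl (J + 1)), hx]
      rw [e1, e2, e3]
      simp only [GB]
      rw [if_pos hbr.1]
    · rw [if_neg (by rintro ⟨-, hmem⟩; exact hbr (PySem.List.mem_pyRange_one.mp hmem)), hdp]
      unfold Gmid
      by_cases hin : 0 ≤ J + 1 ∧ J + 1 ≤ m ∧ 0 ≤ b ∧ b ≤ r
      · rw [if_pos hin, if_pos hin, if_neg (show ¬(J + 1 ≤ J) by omega), if_pos (le_refl (J + 1)), hx]
        have hblt : b < (t : Int) + 1 := by omega
        simp only [GB]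
        rw [if_neg (by omega)]
      · rw [if_neg hin, if_neg hin]
  · rw [if_neg (by rintro ⟨h, -⟩; exact ha h), hdp]
    unfold Gmid
    have hlev : (if a ≤ J then t + 1 else t) = (if a ≤ J + 1 then t + 1 else t) := by
      by_cases hJa : a ≤ J
      · rw [if_pos hJa, if_pos (by omega)]
      · rw [if_neg hJa, if_neg (by omega)]
    rw [hlev]

lemma rowB_fold (m r : Int) (t : Nat) (J : Nat) (hJm : (J : Int) ≤ m)
    (dp : Std.HashMap (Int × Int) Int)
    (hdp : ∀ a b, dp.getD (a, b) 0 = Gmid m r t 0 a b) (a b : Int) :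
    ((PySem.List.pyRange 1 ((J : Int) + 1) 1).foldl (rowB r ((t : Int) + 1)) dp).getD (a, b) 0
      = Gmid m r t (J : Int) a b := by
  induction J generalizing a b with
  | zero =>
      rw [PySem.List.pyRange_one_eq_nil (by norm_num)]
      simpa using hdp a b
  | succ J ih =>
      have hcast : ((J + 1 : Nat) : Int) + 1 = ((J : Int) + 1) + 1 := by push_cast; ring
      rw [hcast, PySem.List.pyRange_one_succ_right (by omega), List.foldl_append,
        List.foldl_cons, List.foldl_nil]
      have hJm' : (J : Int) ≤ m := by push_cast at hJm ⊢; omega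
      rw [show ((J + 1 : Nat) : Int) = (J : Int) + 1 from by push_cast; ring]
      exact rowB_run m r t (J : Int) (by omega) (by push_cast at hJm; omega) _ (fun a b => ih hJm' a b) a b

lemma stepB_run (m r : Int) (hm : 0 ≤ m) (t : Nat)
    (dp : Std.HashMap (Int × Int) Int)
    (hdp : ∀ a b, dp.getD (a, b) 0 = Gmid m r t 0 a b) (a b : Int) :
    (stepB m r dp ((t : Int) + 1)).getD (a, b) 0 = Gmid m r (t + 1) 0 a b := by
  rw [stepB, show m + 1 = (m.toNat : Int) + 1 from by omega,
    rowB_fold m r t m.toNat (by omega) dp hdp a b]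
  unfold Gmid
  by_cases hin : 0 ≤ a ∧ a ≤ m ∧ 0 ≤ b ∧ b ≤ r
  · rw [if_pos hin, if_pos hin, if_pos (show a ≤ (m.toNat : Int) by omega)]
    by_cases ha0 : a ≤ 0
    · have ha : a = 0 := by omega
      subst ha
      rw [if_pos (le_refl (0:Int))]
      simp only [Int.toNat_zero, GB_zero]
    · rw [if_neg ha0]
  · rw [if_neg hin, if_neg hin]

lemma B_inv (m r : Int) (hm : 0 ≤ m) (hr : 0 ≤ r) (t : Nat) (a b : Int) :
    ((PySem.List.pyRange 1 ((t : Int) + 1) 1).foldl (stepB m r) (initB m)).getD (a, b) 0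
      = Gmid m r t 0 a b := by
  induction t generalizing a b with
  | zero =>
      rw [PySem.List.pyRange_one_eq_nil (by norm_num), List.foldl_nil, initB,
        foldl_initB, getD_empty_zero]
      unfold Gmid
      by_cases hin : 0 ≤ a ∧ a ≤ m ∧ 0 ≤ b ∧ b ≤ r
      · rw [if_pos hin]
        have hmem : a ∈ PySem.List.pyRange 0 (m + 1) 1 :=
          PySem.List.mem_pyRange_one.mpr ⟨hin.1, by omega⟩
        have hGB : GB (if a ≤ 0 then 0 + 1 else 0) a.toNat b = if b = 0 then 1 else 0 := by
          by_cases ha0 : a ≤ 0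
          · rw [if_pos ha0, show a.toNat = 0 from by omega, GB_zero]
          · rw [if_neg ha0]; simp only [GB]
        rw [hGB]
        by_cases hb0 : b = 0
        · rw [if_pos ⟨hmem, hb0⟩, if_pos hb0]
        · rw [if_neg (fun h => hb0 h.2), if_neg hb0]
      · rw [if_neg hin, if_neg (by
          rintro ⟨hmem, hb0⟩
          have := PySem.List.mem_pyRange_one.mp hmem
          exact hin ⟨this.1, by omega, by omega, by omega⟩)]
  | succ t ih =>
      have hcast : ((t + 1 : Nat) : Int) + 1 = ((t : Int) + 1) + 1 := by push_cast; ring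
      rw [hcast, PySem.List.pyRange_one_succ_right (by omega), List.foldl_append,
        List.foldl_cons, List.foldl_nil]
      exact stepB_run m r hm t _ (fun a b => ih a b) a b

-- ===== VERDICT (by name: the statement is the Claim_ definition above) =====
theorem solve_spec : Claim_equal_solve := by
  intro n m k _ hpre
  obtain ⟨hn, hm, hk⟩ := hpre
  unfold Spec_solve
  have hA : solve n m k = FN n.toNat m k := by
    unfold solve
    rw [show n + 1 = ((n.toNat : Int)) + 1 from by omega, A_inv m k hm hk n.toNat,
      if_pos ⟨hn, by omega, hm, le_refl m, hk, le_refl k⟩]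
  rw [hA, FN_eq_GB]
  have hTm := TRI_nonneg m hm
  by_cases hcr : n - m < 0 ∨ k - TRI m < 0
  · have hB : solve_alt n m k = 0 := by
      simp only [solve_alt]
      rw [if_pos (show n - m < 0 ∨ k - PySem.Int.floordiv (m * (m + 1)) 2 < 0 from hcr)]
    rw [hB, if_neg (by rintro ⟨-, h2, h3⟩; omega)]
  · push_neg at hcr
    obtain ⟨hc0, hr0⟩ := hcr
    have hB : solve_alt n m k = GB (n - m).toNat m.toNat (k - TRI m) := by
      simp only [solve_alt]
      rw [if_neg (show ¬(n - m < 0 ∨ k - PySem.Int.floordiv (m * (m + 1)) 2 < 0) from by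
        rintro (h | h) <;> [omega; exact absurd h (by rw [show PySem.Int.floordiv (m * (m + 1)) 2 = TRI m from rfl]; omega)]),
        show k - PySem.Int.floordiv (m * (m + 1)) 2 = k - TRI m from rfl,
        show n - m + 1 = (((n - m).toNat : Int)) + 1 from by omega,
        B_inv m (k - TRI m) hm (by omega) (n - m).toNat m (k - TRI m)]
      unfold Gmid
      rw [if_pos ⟨hm, le_refl m, by omega, le_refl _⟩]
      by_cases hm0 : m ≤ 0
      · have hm' : m = 0 := by omega
        subst hm'
        rw [if_pos (le_refl (0 : Int))]
        simp only [Int.toNat_zero, GB_zero]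
      · rw [if_neg hm0]
    rw [hB, if_pos ⟨hm, by omega, by omega⟩,
      show n.toNat - m.toNat = (n - m).toNat from by omega]
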